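-- pv_equiv track=rewrite | github.com/arsamigullin/problem_solving_python | leet/binary_search/1182_Shortest_Distance_to_Target_Color.py | shortestDistanceColor
-- ===== SOURCE A (Python) =====
-- import bisect
-- import collections
-- from typing import List
--
-- def shortestDistanceColor(colors: List[int], queries: List[List[int]]) -> List[int]:
--     hashmap = collections.defaultdict(list)
--     for i,c in enumerate(colors):
--         hashmap[c].append(i)
--
--     query_results = []
--     for i, (target, color) in enumerate(queries):
--         if color not in hashmap:
--             query_results.append(-1)
--             continue
--
--         index_list = hashmap[color]
--         # use bisect from Python standard library
--         # more details: https://docs.python.org/3/library/bisect.html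
--         insert = bisect.bisect_left(index_list, target)
--
--         # compare the index on the left and right of insert
--         # make sure it will not fall out of the index_list
--         left_nearest = abs(index_list[max(insert - 1, 0)] - target)
--         right_nearest = abs(index_list[min(insert, len(index_list) - 1)] - target)
--         query_results.append(min(left_nearest, right_nearest))
--
--     return query_results
-- ===== SOURCE B (Python) =====
-- from typing import List
--
-- def shortestDistanceColor(colors: List[int], queries: List[List[int]]) -> List[int]:
--     # Simpler decomposition: no index map, no binary search — for each query just
--     # scan the colors once, tracking the best (smallest) distance seen, -1 if absent.
--     results = []
--     for target, color in queries:
--         best = -1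
--         for i, c in enumerate(colors):
--             if c == color:
--                 d = abs(i - target)
--                 if best == -1 or d < best:
--                     best = d
--         results.append(best)
--     return results
-- ===== Notes on version B (the rewrite author's own statement) =====
-- stated objective: simpler
-- what changed: Replaced the per-color position map plus bisect_left neighbour comparison with a direct linear scan of colors per query that keeps the smallest distance seen (-1 sentinel for absent colors).
import Mathlib
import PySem

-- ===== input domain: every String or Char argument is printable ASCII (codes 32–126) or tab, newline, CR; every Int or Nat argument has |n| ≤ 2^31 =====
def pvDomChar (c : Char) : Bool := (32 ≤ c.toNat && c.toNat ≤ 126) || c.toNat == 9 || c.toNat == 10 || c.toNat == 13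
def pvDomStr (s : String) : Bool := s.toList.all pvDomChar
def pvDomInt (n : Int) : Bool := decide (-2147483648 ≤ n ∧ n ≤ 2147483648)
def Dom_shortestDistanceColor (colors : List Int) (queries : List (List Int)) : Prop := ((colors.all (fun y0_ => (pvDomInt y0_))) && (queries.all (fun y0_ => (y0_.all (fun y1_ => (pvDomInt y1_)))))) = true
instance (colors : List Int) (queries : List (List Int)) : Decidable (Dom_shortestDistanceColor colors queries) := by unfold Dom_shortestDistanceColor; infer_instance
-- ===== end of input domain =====

-- B replaces A's per-color position map + bisect_left neighbour comparison with a plain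
-- linear scan of `colors` per query tracking the best distance (objective: simpler).

-- ===== PORT A =====
-- Literal port of A: defaultdict(list) of occurrence positions per color, then per query
-- bisect_left on the (sorted) position list and compare the two neighbouring positions.
-- `List.getD _ 0` is exact here: every index A evaluates is in range (the list is nonempty there).
def shortestDistanceColor (colors : List Int) (queries : List (List Int)) : List Int :=
  let hashmap : PySem.Dict Int (List Int) :=
    (PySem.List.enumerate colors).foldl
      (fun d p => d.modify p.2 [] (fun is => is ++ [p.1])) PySem.Dict.empty
  queries.foldl (fun queryResults q =>
    match q with
    | [target, color] =>
      if !hashmap.contains color then queryResults ++ [-1]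
      else
        let indexList := hashmap.getD color []
        let ins := PySem.List.bisectLeft indexList target
        let leftNearest := |indexList.getD (max (ins - 1) 0) 0 - target|
        let rightNearest := |indexList.getD (min ins (indexList.length - 1)) 0 - target|
        queryResults ++ [min leftNearest rightNearest]
    | _ => queryResults ++ [-1]   -- Python raises here (query length ≠ 2); excluded by Pre_
    ) []

-- ===== PORT B =====
def shortestDistanceColor_alt (colors : List Int) (queries : List (List Int)) : List Int :=
  queries.foldl (fun results q =>
    match q with
    | [] => results ++ [-1]         -- Python raises here (query length ≠ 2); excluded by Pre_
    | [_] => results ++ [-1]        -- likewise excluded by Pre_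
    | target :: color :: extra =>
      if extra = [] then
        results ++ [(PySem.List.enumerate colors).foldl (fun best p =>
          if p.2 = color then
            let d := |p.1 - target|
            if best = -1 ∨ d < best then d else best
          else best) (-1)]
      else results ++ [-1]          -- likewise excluded by Pre_
    ) []

-- ===== PRECONDITION & SPEC =====
-- Pre_ excludes exactly the inputs on which Python A raises: a ValueError unpacking
-- `target, color = query` when some query does not have length 2 (B raises there too).
def Pre_shortestDistanceColor (colors : List Int) (queries : List (List Int)) : Prop :=
  ∀ q ∈ queries, q.length = 2
instance (colors : List Int) (queries : List (List Int)) : Decidable (Pre_shortestDistanceColor colors queries) := by unfold Pre_shortestDistanceColor; infer_instance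
def pvWitness_shortestDistanceColor : List Int × List (List Int) :=
  ([1, 1, 2, 1, 3], [[1, 3], [2, 2], [6, 1], [0, 5]])
def Spec_shortestDistanceColor (colors : List Int) (queries : List (List Int)) (out : List Int) : Prop := out = shortestDistanceColor_alt colors queries
instance (colors : List Int) (queries : List (List Int)) (out : List Int) : Decidable (Spec_shortestDistanceColor colors queries out) := by unfold Spec_shortestDistanceColor; infer_instance

-- ===== CLAIM (what is proved, stated in full; the proofs are below) =====
def Claim_equal_shortestDistanceColor : Prop := ∀ (colors : List Int) (queries : List (List Int)), Dom_shortestDistanceColor colors queries → Pre_shortestDistanceColor colors queries → Spec_shortestDistanceColor colors queries (shortestDistanceColor colors queries)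

-- ===== LEMMAS AND PROOFS =====

-- the positions (as Ints) at which colour c occurs in colors, in increasing order
def pvOccs (colors : List Int) (c : Int) : List Int :=
  ((PySem.List.enumerate colors).filter (fun p => p.2 == c)).map (·.1)

-- B's accumulator step: keep the smaller distance, -1 meaning "none seen yet"
def pvMinStep (best d : Int) : Int := if best = -1 ∨ d < best then d else best

-- the common per-query answer both ports compute
def pvAns (colors : List Int) (t c : Int) : Int :=
  ((pvOccs colors c).map (fun i => |i - t|)).foldl pvMinStep (-1)

-- A's dict lookup yields exactly the occurrence-position list
theorem hashmap_getD (colors : List Int) (c : Int) :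
    ((PySem.List.enumerate colors).foldl
      (fun d p => d.modify p.2 [] (fun is => is ++ [p.1])) PySem.Dict.empty).getD c []
    = pvOccs colors c := by
  have h := PySem.Dict.getD_foldl_modify_append ((PySem.List.enumerate colors).map Prod.swap)
      (PySem.Dict.empty : PySem.Dict Int (List Int)) c
  rw [List.foldl_map] at h
  simp only [Prod.fst_swap, Prod.snd_swap] at h
  rw [h]
  simp [pvOccs, List.filter_map, List.map_map, Function.comp_def]

theorem contains_fold_aux (l : List (Int × Int)) (d : PySem.Dict Int (List Int)) (c : Int) :
    (l.foldl (fun d p => d.modify p.2 [] (fun is => is ++ [p.1])) d).contains c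
    = (d.contains c || l.any (fun p => p.2 == c)) := by
  induction l generalizing d with
  | nil => simp
  | cons p l ih =>
    have hcomm : (c == p.2) = (p.2 == c) := by
      by_cases h : c = p.2 <;> simp [h] <;> exact fun h2 => h h2.symm
    simp [List.foldl_cons, ih, PySem.Dict.contains_modify, hcomm, Bool.or_assoc,
      Bool.or_left_comm]

-- A's membership test: the colour is a key iff it occurs in colors
theorem hashmap_contains (colors : List Int) (c : Int) :
    ((PySem.List.enumerate colors).foldl
      (fun d p => d.modify p.2 [] (fun is => is ++ [p.1])) PySem.Dict.empty).contains c
    = !(pvOccs colors c).isEmpty := by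
  rw [contains_fold_aux]
  rcases hE : (PySem.List.enumerate colors).any (fun p => p.2 == c) with _ | _
  · simp_all [pvOccs, List.isEmpty_iff, List.filter_eq_nil_iff, List.any_eq_false]
    exact hE
  · simp only [PySem.Dict.contains_empty, Bool.false_or]
    simp only [List.any_eq_true] at hE
    obtain ⟨p, hp, hpc⟩ := hE
    have hf : p ∈ (PySem.List.enumerate colors).filter (fun p => p.2 == c) :=
      List.mem_filter.mpr ⟨hp, hpc⟩
    have : p.1 ∈ pvOccs colors c := List.mem_map_of_mem hf
    simp [List.isEmpty_eq_false_iff, List.ne_nil_of_mem this]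

theorem pvOccs_pairwise (colors : List Int) (c : Int) :
    (pvOccs colors c).Pairwise (· < ·) :=
  List.Pairwise.map _ (fun _ _ h => h)
    ((PySem.List.pairwise_lt_enumerate colors 0).filter _)

theorem inner_aux (l : List (Int × Int)) (t c b : Int) :
    l.foldl (fun best p =>
        if p.2 = c then
          let d := |p.1 - t|
          if best = -1 ∨ d < best then d else best
        else best) b
    = ((l.filter (fun p => p.2 == c)).map (·.1)).foldl (fun best i => pvMinStep best |i - t|) b := by
  induction l generalizing b with
  | nil => rfl
  | cons p l ih => by_cases h : p.2 = c <;> simp [h, ih, pvMinStep]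

-- B's inner loop computes pvAns
theorem alt_inner (colors : List Int) (t c : Int) :
    (PySem.List.enumerate colors).foldl (fun best p =>
        if p.2 = c then
          let d := |p.1 - t|
          if best = -1 ∨ d < best then d else best
        else best) (-1) = pvAns colors t c := by
  rw [inner_aux]
  simp [pvAns, pvOccs, List.foldl_map]

-- folding pvMinStep from a nonnegative seed over nonnegative elements is folding min
theorem foldl_minStep_nonneg (ds : List Int) (b : Int) (hb : 0 ≤ b)
    (hds : ∀ d ∈ ds, 0 ≤ d) : ds.foldl pvMinStep b = ds.foldl min b := by
  induction ds generalizing b with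
  | nil => rfl
  | cons d ds ih =>
    have h1 : pvMinStep b d = min b d := by
      have hd : 0 ≤ d := hds d (by simp)
      simp only [pvMinStep, min_def]
      split_ifs <;> omega
    simp only [List.foldl_cons, h1]
    exact ih _ (le_min hb (hds d (by simp))) (fun x hx => hds x (by simp [hx]))

theorem foldl_min_mem (ds : List Int) (b : Int) :
    ds.foldl min b = b ∨ ds.foldl min b ∈ ds := by
  induction ds generalizing b with
  | nil => simp
  | cons d ds ih =>
    rcases ih (min b d) with h | h
    · simp only [List.foldl_cons, h]
      rcases min_choice b d with hm | hm <;> simp [hm]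
    · simp [List.foldl_cons, h]

theorem foldl_min_le (ds : List Int) (b : Int) :
    ds.foldl min b ≤ b ∧ ∀ d ∈ ds, ds.foldl min b ≤ d := by
  induction ds generalizing b with
  | nil => simp
  | cons d ds ih =>
    obtain ⟨h1, h2⟩ := ih (min b d)
    refine ⟨le_trans h1 (min_le_left _ _), ?_⟩
    intro x hx
    rcases List.mem_cons.mp hx with rfl | hx
    · exact le_trans h1 (min_le_right _ _)
    · exact h2 x hx

-- on a nonempty occurrence list, pvAns is a distance and lower-bounds all distances
theorem pvAns_spec (colors : List Int) (t c : Int) (h : pvOccs colors c ≠ []) :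
    pvAns colors t c ∈ (pvOccs colors c).map (fun i => |i - t|)
    ∧ ∀ d ∈ (pvOccs colors c).map (fun i => |i - t|), pvAns colors t c ≤ d := by
  rcases hO : pvOccs colors c with _ | ⟨o, os⟩
  · exact absurd hO h
  have hstep : pvMinStep (-1) |o - t| = |o - t| := by simp [pvMinStep]
  have hnn : ∀ d ∈ (os.map (fun i => |i - t|)), 0 ≤ d := by
    intro d hd
    obtain ⟨i, _, rfl⟩ := List.mem_map.mp hd
    exact abs_nonneg _
  have hAns : pvAns colors t c = (os.map (fun i => |i - t|)).foldl min |o - t| := by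
    rw [pvAns, hO]
    simp only [List.map_cons, List.foldl_cons, hstep]
    exact foldl_minStep_nonneg _ _ (abs_nonneg _) hnn
  obtain ⟨h1, h2⟩ := foldl_min_le (os.map (fun i => |i - t|)) |o - t|
  constructor
  · rcases foldl_min_mem (os.map (fun i => |i - t|)) |o - t| with hm | hm
    · simp [hAns, hm]
    · simp only [List.map_cons, List.mem_cons]
      right; rw [hAns]; exact hm
  · intro d hd
    simp only [List.map_cons, List.mem_cons] at hd
    rcases hd with rfl | hd
    · rw [hAns]; exact h1
    · rw [hAns]; exact h2 d hd

-- A's two-neighbour comparison after bisect_left equals pvAns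
theorem bisect_query (colors : List Int) (t c : Int) (h : pvOccs colors c ≠ []) :
    min |(pvOccs colors c).getD (max (PySem.List.bisectLeft (pvOccs colors c) t - 1) 0) 0 - t|
        |(pvOccs colors c).getD (min (PySem.List.bisectLeft (pvOccs colors c) t) ((pvOccs colors c).length - 1)) 0 - t|
    = pvAns colors t c := by
  set l := pvOccs colors c with hl
  have hn : 0 < l.length := List.length_pos_iff.mpr h
  have hple : l.Pairwise (· ≤ ·) := (pvOccs_pairwise colors c).imp (fun hab => le_of_lt hab)
  have hmono : ∀ (i j : Nat) (hi : i < l.length) (hj : j < l.length), i ≤ j → l[i] ≤ l[j] := by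
    intro i j hi hj hij
    rcases Nat.lt_or_ge i j with hlt | hge
    · exact (List.pairwise_iff_getElem.mp hple) i j hi hj hlt
    · have : i = j := le_antisymm hij hge
      subst this; rfl
  obtain ⟨hins_le, hlt, hge⟩ := PySem.List.bisectLeft_spec l t hple
  set ins := PySem.List.bisectLeft l t with hins
  have hkL : max (ins - 1) 0 < l.length := by omega
  have hkR : min ins (l.length - 1) < l.length := by omega
  rw [List.getD_eq_getElem l 0 hkL, List.getD_eq_getElem l 0 hkR]
  -- the min of the two candidate distances bounds every distance from below
  have hbound : ∀ (j : Nat) (hj : j < l.length),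
      min |l[max (ins - 1) 0] - t| |l[min ins (l.length - 1)] - t| ≤ |l[j] - t| := by
    intro j hj
    rcases Nat.lt_or_ge j ins with hjlt | hjge
    · -- j < ins: the left candidate sits at ins-1 and everything before ins is < t
      have hins1 : ins - 1 < l.length := by omega
      have hL : max (ins - 1) 0 = ins - 1 := by omega
      have h1 : l[j] ≤ l[ins - 1]'hins1 := hmono j (ins - 1) hj hins1 (by omega)
      have h2 : l[ins - 1]'hins1 < t := hlt (ins - 1) hins1 (by omega)
      have h3 : l[j] < t := lt_of_le_of_lt h1 h2
      have e1 : |l[j] - t| = t - l[j] := by rw [abs_of_neg (by omega)]; ring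
      have e2 : |l[ins - 1]'hins1 - t| = t - l[ins - 1]'hins1 := by
        rw [abs_of_neg (by omega)]; ring
      calc min |l[max (ins - 1) 0]'hkL - t| |l[min ins (l.length - 1)]'hkR - t|
          ≤ |l[max (ins - 1) 0]'hkL - t| := min_le_left _ _
        _ ≤ |l[j] - t| := by simp only [hL] at *; omega
    · -- ins ≤ j: the right candidate sits at ins and everything from ins on is ≥ t
      have hins2 : ins < l.length := by omega
      have hR : min ins (l.length - 1) = ins := by omega
      have h1 : l[ins]'hins2 ≤ l[j] := hmono ins j hins2 hj hjge
      have h2 : t ≤ l[ins]'hins2 := hge ins hins2 (le_refl _)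
      have e1 : |l[j] - t| = l[j] - t := by rw [abs_of_nonneg (by omega)]
      have e2 : |l[ins]'hins2 - t| = l[ins]'hins2 - t := by rw [abs_of_nonneg (by omega)]
      calc min |l[max (ins - 1) 0]'hkL - t| |l[min ins (l.length - 1)]'hkR - t|
          ≤ |l[min ins (l.length - 1)]'hkR - t| := min_le_right _ _
        _ ≤ |l[j] - t| := by simp only [hR] at *; omega
  obtain ⟨hmem, hle⟩ := pvAns_spec colors t c h
  rw [← hl] at hmem hle
  apply le_antisymm
  · obtain ⟨i, hi, he⟩ := List.mem_map.mp hmem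
    obtain ⟨j, hj, rfl⟩ := List.mem_iff_getElem.mp hi
    rw [← he]
    exact hbound j hj
  · apply le_min
    · exact hle _ (List.mem_map_of_mem (List.getElem_mem hkL))
    · exact hle _ (List.mem_map_of_mem (List.getElem_mem hkR))

-- A's whole per-query value equals pvAns
theorem query_eq (colors : List Int) (t c : Int) :
    (if !(((PySem.List.enumerate colors).foldl
          (fun d p => d.modify p.2 [] (fun is => is ++ [p.1])) PySem.Dict.empty).contains c)
     then (-1 : Int)
     else
       let indexList := ((PySem.List.enumerate colors).foldl
          (fun d p => d.modify p.2 [] (fun is => is ++ [p.1])) PySem.Dict.empty).getD c []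
       let ins := PySem.List.bisectLeft indexList t
       min |indexList.getD (max (ins - 1) 0) 0 - t|
           |indexList.getD (min ins (indexList.length - 1)) 0 - t|)
    = pvAns colors t c := by
  rw [hashmap_contains, hashmap_getD]
  rcases hO : pvOccs colors c with _ | ⟨o, os⟩
  · simp [hO, pvAns]
  · rw [← hO]
    have hne : pvOccs colors c ≠ [] := by rw [hO]; simp
    rw [List.isEmpty_eq_false_iff.mpr hne]
    simpa using bisect_query colors t c hne

-- one step of the two query folds agrees on a well-formed query
theorem step_eq (colors : List Int) (t c : Int) (acc : List Int) :
    (if !(((PySem.List.enumerate colors).foldl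
          (fun d p => d.modify p.2 [] (fun is => is ++ [p.1])) PySem.Dict.empty).contains c)
     then acc ++ [-1]
     else
       let indexList := ((PySem.List.enumerate colors).foldl
          (fun d p => d.modify p.2 [] (fun is => is ++ [p.1])) PySem.Dict.empty).getD c []
       let ins := PySem.List.bisectLeft indexList t
       let leftNearest := |indexList.getD (max (ins - 1) 0) 0 - t|
       let rightNearest := |indexList.getD (min ins (indexList.length - 1)) 0 - t|
       acc ++ [min leftNearest rightNearest])
    = acc ++ [(PySem.List.enumerate colors).foldl (fun best p =>
        if p.2 = c then
          let d := |p.1 - t|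
          if best = -1 ∨ d < best then d else best
        else best) (-1)] := by
  rw [alt_inner colors t c, ← query_eq colors t c]
  split_ifs with h
  · rfl
  · rfl

theorem fold_eq (colors : List Int) (queries : List (List Int))
    (hpre : ∀ q ∈ queries, q.length = 2) (acc : List Int) :
    queries.foldl (fun queryResults q =>
      match q with
      | [target, color] =>
        if !(((PySem.List.enumerate colors).foldl
            (fun d p => d.modify p.2 [] (fun is => is ++ [p.1])) PySem.Dict.empty).contains color)
        then queryResults ++ [-1]
        else
          let indexList := ((PySem.List.enumerate colors).foldl
              (fun d p => d.modify p.2 [] (fun is => is ++ [p.1])) PySem.Dict.empty).getD color []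
          let ins := PySem.List.bisectLeft indexList target
          let leftNearest := |indexList.getD (max (ins - 1) 0) 0 - target|
          let rightNearest := |indexList.getD (min ins (indexList.length - 1)) 0 - target|
          queryResults ++ [min leftNearest rightNearest]
      | _ => queryResults ++ [-1]) acc
    = queries.foldl (fun results q =>
      match q with
      | [] => results ++ [-1]
      | [_] => results ++ [-1]
      | target :: color :: extra =>
        if extra = [] then
          results ++ [(PySem.List.enumerate colors).foldl (fun best p =>
            if p.2 = color then
              let d := |p.1 - target|
              if best = -1 ∨ d < best then d else best
            else best) (-1)]
        else results ++ [-1]) acc := by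
  induction queries generalizing acc with
  | nil => rfl
  | cons q qs ih =>
    have hq : q.length = 2 := hpre q (by simp)
    obtain ⟨t, c, rfl⟩ : ∃ t c, q = [t, c] := by
      rcases q with _ | ⟨t, _ | ⟨c, _ | _⟩⟩ <;> simp_all
    simp only [List.foldl_cons]
    rw [ih (fun q hq => hpre q (by simp [hq]))]
    congr 1
    simpa using step_eq colors t c acc

-- ===== VERDICT (by name: the statement is the Claim_ definition above) =====
theorem shortestDistanceColor_spec : Claim_equal_shortestDistanceColor := by
  intro colors queries _ hpre
  unfold Spec_shortestDistanceColor shortestDistanceColor shortestDistanceColor_alt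
  exact fold_eq colors queries hpre []
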